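-- pv_equiv track=rewrite | github.com/alexdelprete/ha-abb-powerone-pvi-sunspec | tests/async_sunspec2/test_types_and_parser.py | _pack_string
-- ===== SOURCE A (Python) =====
-- def _pack_string(s: str, size: int) -> list[int]:
--     """Pack an ASCII string into SunSpec big-endian string registers."""
--     s = (s or "").ljust(size, "\x00")[:size]
--     bs = s.encode("ascii")
--     regs = []
--     for i in range(0, len(bs), 2):
--         hi = bs[i]
--         lo = bs[i + 1] if i + 1 < len(bs) else 0
--         regs.append((hi << 8) | lo)
--     return regs
-- ===== SOURCE B (Python) =====
-- def _split(acc: int, n: int) -> list[int]: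
--     """acc encodes n big-endian 16-bit words; split it recursively into the word list."""
--     if n == 0:
--         return []
--     if n == 1:
--         return [acc]
--     k = n // 2
--     return _split(acc >> (16 * k), n - k) + _split(acc & ((1 << (16 * k)) - 1), k)
--
--
-- def _pack_string(s: str, size: int) -> list[int]:
--     """Pack an ASCII string into SunSpec big-endian string registers."""
--     bs = (s or "").ljust(size, "\x00")[:size].encode("ascii")
--     if len(bs) % 2:
--         bs += b"\x00"
--     return _split(int.from_bytes(bs, "big"), len(bs) // 2)
-- ===== Notes on version B (the rewrite author's own statement) =====
-- stated objective: alternative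
-- what changed: The per-pair shift/or loop over byte indices is replaced by building one big-endian integer from the whole buffer (int.from_bytes after padding odd buffers with a NUL) and recursively splitting that integer in half into its 16-bit words.
import Mathlib
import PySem

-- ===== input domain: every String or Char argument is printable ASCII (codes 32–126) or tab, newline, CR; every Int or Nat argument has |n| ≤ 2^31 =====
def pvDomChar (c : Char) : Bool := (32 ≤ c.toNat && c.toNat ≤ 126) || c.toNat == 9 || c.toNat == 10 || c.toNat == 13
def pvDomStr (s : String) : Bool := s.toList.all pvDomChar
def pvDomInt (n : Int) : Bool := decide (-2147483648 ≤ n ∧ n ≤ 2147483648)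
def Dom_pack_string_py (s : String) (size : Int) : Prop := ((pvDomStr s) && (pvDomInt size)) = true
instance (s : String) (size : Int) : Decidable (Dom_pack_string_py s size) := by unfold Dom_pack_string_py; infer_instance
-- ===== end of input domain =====

-- B replaces the per-pair shift/or loop by one big-endian integer built from the whole
-- buffer and a recursive binary split of that integer into 16-bit words ('alternative', not faster).

-- ===== PORT A =====
-- Pre-step shared VERBATIM by both Python versions:
--   s = (s or "").ljust(size, "\x00")[:size]; bs = s.encode("ascii")
-- 's or ""' is the identity on a str argument; encode("ascii") raises only for code points
-- > 127, which Dom_pack_string_py excludes, so on the claimed domain it is the byte list.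
def pvPrep (s : String) (size : Int) : List Int :=
  let cs := s.toList
  let padded :=
    if (cs.length : Int) < size then
      cs ++ List.replicate (size - (cs.length : Int)).toNat (Char.ofNat 0)
    else cs
  (PySem.List.slice padded none (some size)).map (fun c => (c.toNat : Int))

-- 'for i in range(0, len(bs), 2)' as index recursion in steps of two; bs[i] is always in
-- range there, so getD is exact; the guarded 'bs[i+1] if i+1 < len(bs) else 0' is kept.
def pvLoopA (bs : List Int) (i : Nat) : List Int :=
  if i < bs.length then
    PySem.Int.bor (bs.getD i 0 <<< (8:Nat)) (if i + 1 < bs.length then bs.getD (i + 1) 0 else 0)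
      :: pvLoopA bs (i + 2)
  else []
termination_by bs.length - i
decreasing_by omega

def pack_string_py (s : String) (size : Int) : List Int :=
  pvLoopA (pvPrep s size) 0

-- ===== PORT B =====
-- _split(acc, n): acc encodes n big-endian 16-bit words; split it recursively (k = n // 2).
def pvSplit (acc : Int) (n : Nat) : List Int :=
  if n = 0 then []
  else if n = 1 then [acc]
  else
    let k := n / 2
    pvSplit (acc >>> (16 * k)) (n - k) ++ pvSplit (PySem.Int.band acc ((1:Int) <<< (16 * k) - 1)) k
termination_by n
decreasing_by all_goals omega

-- same pre-step; 'if len(bs) % 2: bs += b"\x00"'; int.from_bytes(bs, "big") is the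
-- left fold acc*256 + byte (exact: every element is a byte value 0..255).
def pack_string_py_alt (s : String) (size : Int) : List Int :=
  let bs := pvPrep s size
  let bs := if bs.length % 2 = 1 then bs ++ [(0 : Int)] else bs
  pvSplit (bs.foldl (fun a b => a * 256 + b) 0) (bs.length / 2)

-- ===== PRECONDITION & SPEC =====
def Spec_pack_string_py (s : String) (size : Int) (out : List Int) : Prop := out = pack_string_py_alt s size
instance (s : String) (size : Int) (out : List Int) : Decidable (Spec_pack_string_py s size out) := by unfold Spec_pack_string_py; infer_instance

-- ===== CLAIM (what is proved, stated in full; the proofs are below) =====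
def Claim_equal_pack_string_py : Prop := ∀ (s : String) (size : Int), Dom_pack_string_py s size → Spec_pack_string_py s size (pack_string_py s size)

-- ===== LEMMAS AND PROOFS =====

-- the common value both ports compute: the big-endian 16-bit pairs of a byte list
def pvPairs : List Int → List Int
  | [] => []
  | [h] => [h * 256]
  | h :: l :: t => (h * 256 + l) :: pvPairs t

-- the big-endian value of a byte list (what B's int.from_bytes fold produces)
def pvFrom (bs : List Int) : Int := bs.foldl (fun a b => a * 256 + b) 0

theorem pvPrep_bounds (s : String) (size : Int) (hd : Dom_pack_string_py s size) :
    ∀ x ∈ pvPrep s size, 0 ≤ x ∧ x < 256 := by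
  intro x hx
  unfold pvPrep at hx
  simp only [List.mem_map] at hx
  obtain ⟨c, hc, rfl⟩ := hx
  have hc' := PySem.List.mem_of_mem_slice _ _ _ hc
  have hmem : c ∈ s.toList ∨ c = Char.ofNat 0 := by
    by_cases hlt : ((s.toList.length : Int) < size)
    · rw [if_pos hlt] at hc'
      rcases List.mem_append.1 hc' with h | h
      · exact Or.inl h
      · exact Or.inr (List.eq_of_mem_replicate h)
    · rw [if_neg hlt] at hc'
      exact Or.inl hc'
  have hlt256 : c.toNat < 256 := by
    rcases hmem with h | h
    · simp only [Dom_pack_string_py, pvDomStr, Bool.and_eq_true, List.all_eq_true] at hd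
      have := hd.1 c h
      simp only [pvDomChar, Bool.or_eq_true, Bool.and_eq_true, decide_eq_true_eq,
        beq_iff_eq] at this
      omega
    · subst h; decide
  exact ⟨by exact_mod_cast Nat.zero_le _, by exact_mod_cast hlt256⟩

theorem bor_shift_eq (h l : Int) (hh : 0 ≤ h) (hl0 : 0 ≤ l) (hl : l < 256) :
    PySem.Int.bor (h <<< (8:Nat)) l = h * 256 + l := by
  obtain ⟨m, rfl⟩ := Int.eq_ofNat_of_zero_le hh
  obtain ⟨n, rfl⟩ := Int.eq_ofNat_of_zero_le hl0
  have hn : n < 2 ^ 8 := by exact_mod_cast hl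
  have h1 : ((m : Int) <<< (8:Nat)) = ((m <<< 8 : Nat) : Int) := by
    rw [Int.shiftLeft_eq, Nat.shiftLeft_eq]; push_cast; ring
  rw [h1, PySem.Int.bor_natCast, ← Nat.shiftLeft_add_eq_or_of_lt hn m, Nat.shiftLeft_eq]
  push_cast; ring

theorem loopA_getD_shift (h l : Int) (t : List Int) (i : Nat) (d : Int) :
    (h :: l :: t).getD (i + 2) d = t.getD i d := by
  show (h :: l :: t).getD (i + 1 + 1) d = t.getD i d
  rw [List.getD_cons_succ, List.getD_cons_succ]

theorem loopA_stop (bs : List Int) (i : Nat) (hle : bs.length ≤ i) : pvLoopA bs i = [] := by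
  rw [pvLoopA, if_neg (by omega)]

theorem loopA_shift (h l : Int) : ∀ i (t : List Int), pvLoopA (h :: l :: t) (i + 2) = pvLoopA t i := by
  have key : ∀ fuel i (t : List Int), t.length ≤ i + fuel →
      pvLoopA (h :: l :: t) (i + 2) = pvLoopA t i := by
    intro fuel
    induction fuel with
    | zero =>
      intro i t hle
      rw [loopA_stop (h :: l :: t) (i + 2) (by simp only [List.length_cons]; omega),
        loopA_stop t i (by omega)]
    | succ f ih =>
      intro i t hle
      by_cases hi : i < t.length
      · conv_lhs => rw [pvLoopA]
        conv_rhs => rw [pvLoopA]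
        rw [if_pos (show i + 2 < (h :: l :: t).length by simp only [List.length_cons]; omega),
          if_pos hi]
        have e1 : (h :: l :: t).getD (i + 2) 0 = t.getD i 0 := loopA_getD_shift h l t i 0
        have e2 : (if i + 2 + 1 < (h :: l :: t).length then (h :: l :: t).getD (i + 2 + 1) 0 else 0)
            = (if i + 1 < t.length then t.getD (i + 1) 0 else 0) := by
          by_cases hj : i + 1 < t.length
          · rw [if_pos (by simp only [List.length_cons]; omega), if_pos hj,
              show i + 2 + 1 = (i + 1) + 2 from rfl, loopA_getD_shift]
          · rw [if_neg (by simp only [List.length_cons]; omega), if_neg hj]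
        rw [e1, e2, show i + 2 + 2 = (i + 2) + 2 from rfl, ih (i + 2) t (by omega)]
      · rw [loopA_stop (h :: l :: t) (i + 2) (by simp only [List.length_cons]; omega),
          loopA_stop t i (by omega)]
  intro i t
  exact key (t.length + 1) i t (by omega)

theorem loopA_eq_pairs (bs : List Int) (hb : ∀ x ∈ bs, 0 ≤ x ∧ x < 256) :
    pvLoopA bs 0 = pvPairs bs := by
  induction bs using pvPairs.induct with
  | case1 => rw [loopA_stop _ _ (by simp)]; rfl
  | case2 h =>
    conv_lhs => rw [pvLoopA]
    rw [if_pos (by simp), if_neg (by simp), loopA_stop [h] 2 (by simp)]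
    simp only [List.getD_cons_zero, PySem.Int.bor_zero, pvPairs]
    rw [Int.shiftLeft_eq]
    norm_num
  | case3 h l t ih =>
    conv_lhs => rw [pvLoopA]
    rw [if_pos (by simp)]
    rw [show (0 + 2 : Nat) = 2 from rfl,
      show pvLoopA (h :: l :: t) 2 = pvLoopA t 0 from loopA_shift h l 0 t]
    rw [if_pos (by simp)]
    simp only [List.getD_cons_zero, List.getD_cons_succ]
    obtain ⟨hh0, _⟩ := hb h (by simp)
    obtain ⟨hl0, hl1⟩ := hb l (by simp)
    rw [bor_shift_eq h l hh0 hl0 hl1, ih (fun x hx => hb x (by simp [hx]))]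
    rfl

theorem foldl_from (bs : List Int) (a : Int) :
    bs.foldl (fun a b => a * 256 + b) a = a * 256 ^ bs.length + pvFrom bs := by
  induction bs generalizing a with
  | nil => simp [pvFrom]
  | cons b t ih =>
    simp only [List.foldl_cons, List.length_cons, pvFrom]
    rw [ih (a * 256 + b), ih (0 * 256 + b)]
    ring

theorem pvFrom_append (xs ys : List Int) :
    pvFrom (xs ++ ys) = pvFrom xs * 256 ^ ys.length + pvFrom ys := by
  unfold pvFrom
  rw [List.foldl_append, foldl_from]
  rfl

theorem pvFrom_bounds (bs : List Int) (hb : ∀ x ∈ bs, 0 ≤ x ∧ x < 256) :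
    0 ≤ pvFrom bs ∧ pvFrom bs < 256 ^ bs.length := by
  induction bs with
  | nil => simp [pvFrom]
  | cons b t ih =>
    obtain ⟨hb0, hb1⟩ := hb b (by simp)
    obtain ⟨ih0, ih1⟩ := ih (fun x hx => hb x (by simp [hx]))
    have hc : pvFrom (b :: t) = b * 256 ^ t.length + pvFrom t := by
      unfold pvFrom
      simp only [List.foldl_cons]
      rw [foldl_from]
      ring_nf
      rfl
    have hp : (0:Int) < 256 ^ t.length := by positivity
    constructor
    · rw [hc]; positivity
    · rw [hc, List.length_cons, pow_succ]
      nlinarith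

theorem pairs_append (xs ys : List Int) (he : xs.length % 2 = 0) :
    pvPairs (xs ++ ys) = pvPairs xs ++ pvPairs ys := by
  induction xs using pvPairs.induct with
  | case1 => simp [pvPairs]
  | case2 h => simp at he
  | case3 h l t ih =>
    simp only [List.cons_append, pvPairs]
    rw [ih (by simp only [List.length_cons] at he ⊢; omega)]

theorem pairs_pad (bs : List Int) (ho : bs.length % 2 = 1) :
    pvPairs (bs ++ [0]) = pvPairs bs := by
  induction bs using pvPairs.induct with
  | case1 => simp at ho
  | case2 h => simp [pvPairs]
  | case3 h l t ih =>
    simp only [List.cons_append, pvPairs]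
    rw [ih (by simp only [List.length_cons] at ho ⊢; omega)]

theorem pow256_eq (k : Nat) : (256 : Int) ^ (2 * k) = 2 ^ (16 * k) := by
  rw [show (256 : Int) = 2 ^ 8 from by norm_num, ← pow_mul]
  ring_nf

theorem shiftR_words (H L : Int) (k : Nat) (hL0 : 0 ≤ L) (hL : L < 2 ^ (16 * k)) :
    (H * 2 ^ (16 * k) + L) >>> (16 * k) = H := by
  rw [Int.shiftRight_eq_div_pow]
  push_cast
  rw [add_comm, Int.add_mul_ediv_right _ _ (by positivity)]
  rw [Int.ediv_eq_zero_of_lt hL0 hL]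
  ring

theorem band_words (H L : Int) (k : Nat) (hL0 : 0 ≤ L) (hL : L < 2 ^ (16 * k)) (hH : 0 ≤ H) :
    PySem.Int.band (H * 2 ^ (16 * k) + L) ((1:Int) <<< (16 * k) - 1) = L := by
  obtain ⟨m, rfl⟩ := Int.eq_ofNat_of_zero_le hH
  obtain ⟨p, rfl⟩ := Int.eq_ofNat_of_zero_le hL0
  have hp : p < 2 ^ (16 * k) := by exact_mod_cast hL
  have hmask : ((1 : Int) <<< (16 * k)) - 1 = ((2 ^ (16 * k) - 1 : Nat) : Int) := by
    rw [Int.shiftLeft_eq]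
    have h1 : (1:Nat) ≤ 2 ^ (16*k) := Nat.one_le_two_pow
    push_cast [h1]
    ring
  have hsum : ((m : Int) * 2 ^ (16 * k) + (p : Int)) = ((m * 2 ^ (16 * k) + p : Nat) : Int) := by
    push_cast; ring
  rw [hmask, hsum, PySem.Int.band_natCast, Nat.and_two_pow_sub_one_eq_mod]
  have : (m * 2 ^ (16 * k) + p) % 2 ^ (16 * k) = p := by
    rw [Nat.mul_comm, Nat.mul_add_mod_self_left]
    exact Nat.mod_eq_of_lt hp
  rw [this]

theorem split_eq_pairs : ∀ n (bs : List Int), bs.length = 2 * n →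
    (∀ x ∈ bs, 0 ≤ x ∧ x < 256) → pvSplit (pvFrom bs) n = pvPairs bs := by
  intro n
  induction n using Nat.strong_induction_on with
  | _ n IH =>
    intro bs hlen hb
    match n with
    | 0 =>
      have : bs = [] := List.eq_nil_of_length_eq_zero (by omega)
      subst this
      rw [pvSplit]; rfl
    | 1 =>
      match bs, hlen with
      | [h, l], _ =>
        rw [pvSplit, if_neg (by omega), if_pos rfl]
        show [(0 * 256 + h) * 256 + l] = pvPairs [h, l]
        show [(0 * 256 + h) * 256 + l] = [h * 256 + l]
        norm_num
    | (m + 2) =>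
      set n := m + 2 with hn
      rw [pvSplit, if_neg (by omega), if_neg (by omega)]
      simp only []
      set k := n / 2 with hk
      have hk1 : 1 ≤ k := by omega
      have hkn : k < n := by omega
      set mhi := 2 * (n - k) with hm
      have hmle : mhi ≤ bs.length := by omega
      set hi := bs.take mhi with hhi
      set lo := bs.drop mhi with hlo
      have hbs : bs = hi ++ lo := (List.take_append_drop mhi bs).symm
      have hhl : hi.length = mhi := by rw [hhi, List.length_take]; omega
      have hll : lo.length = 2 * k := by rw [hlo, List.length_drop]; omega
      have hbhi : ∀ x ∈ hi, 0 ≤ x ∧ x < 256 := fun x hx => hb x (hbs ▸ List.mem_append_left _ hx)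
      have hblo : ∀ x ∈ lo, 0 ≤ x ∧ x < 256 := fun x hx => hb x (hbs ▸ List.mem_append_right _ hx)
      have hHb := pvFrom_bounds hi hbhi
      have hLb := pvFrom_bounds lo hblo
      have hfrom : pvFrom bs = pvFrom hi * 2 ^ (16 * k) + pvFrom lo := by
        rw [hbs, pvFrom_append, hll, pow256_eq]
      have hL2 : pvFrom lo < 2 ^ (16 * k) := by
        have := hLb.2; rw [hll, pow256_eq] at this; exact this
      rw [hfrom, shiftR_words _ _ k hLb.1 hL2, band_words _ _ k hLb.1 hL2 hHb.1]
      rw [IH (n - k) (by omega) hi (by omega) hbhi, IH k (by omega) lo hll hblo]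
      rw [hbs, pairs_append hi lo (by omega)]

theorem alt_eq_pairs (bs : List Int) (hb : ∀ x ∈ bs, 0 ≤ x ∧ x < 256) :
    (let bsE := if bs.length % 2 = 1 then bs ++ [(0 : Int)] else bs
     pvSplit (bsE.foldl (fun a b => a * 256 + b) 0) (bsE.length / 2)) = pvPairs bs := by
  by_cases hp : bs.length % 2 = 1
  · simp only [if_pos hp]
    have hbE : ∀ x ∈ bs ++ [(0:Int)], 0 ≤ x ∧ x < 256 := by
      intro x hx
      rcases List.mem_append.1 hx with h | h
      · exact hb x h
      · simp at h; subst h; exact ⟨le_refl 0, by norm_num⟩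
    have hlen : (bs ++ [(0:Int)]).length = 2 * ((bs ++ [(0:Int)]).length / 2) := by
      simp only [List.length_append, List.length_cons, List.length_nil]
      omega
    show pvSplit (pvFrom (bs ++ [(0:Int)])) ((bs ++ [(0:Int)]).length / 2) = pvPairs bs
    rw [split_eq_pairs _ _ hlen hbE, pairs_pad bs hp]
  · simp only [if_neg hp]
    show pvSplit (pvFrom bs) (bs.length / 2) = pvPairs bs
    exact split_eq_pairs _ _ (by omega) hb

-- ===== VERDICT (by name: the statement is the Claim_ definition above) =====
theorem pack_string_py_spec : Claim_equal_pack_string_py := by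
  intro s size hd
  unfold Spec_pack_string_py pack_string_py pack_string_py_alt
  have hb := pvPrep_bounds s size hd
  rw [loopA_eq_pairs _ hb]
  exact (alt_eq_pairs _ hb).symm
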